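-- pv_equiv track=rewrite | github.com/sylvia-griffin/creating_a_game_with_python | main.py | get_word_at_cell
-- ===== SOURCE A (Python) =====
-- answers = [
--     ("FOOTBALL", 0, 8, "across"),
--     ("TENNIS", 5, 5, "across"),
--     ("VOLLEYBALL", 8, 3, "across"),
--     ("SOCCER", 11, 0, "across"),
--     ("BASKETBALL", 0, 12, "down"),
--     ("BASEBALL", 3, 10, "down"),
--     ("HOCKEY", 7, 4, "down"),
--     ("GOLF", 10, 1, "down"),
-- ]
--
-- def get_word_at_cell(row, col):
--     for word, start_row, start_col, direction in answers:
--         for i in range(len(word)):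
--             r = start_row + i if direction == "down" else start_row
--             c = start_col + i if direction == "across" else start_col
--             if r == row and c == col:
--                 return word, start_row, start_col, direction
--     return None
-- ===== SOURCE B (Python) =====
-- answers = [
--     ("FOOTBALL", 0, 8, "across"),
--     ("TENNIS", 5, 5, "across"),
--     ("VOLLEYBALL", 8, 3, "across"),
--     ("SOCCER", 11, 0, "across"),
--     ("BASKETBALL", 0, 12, "down"),
--     ("BASEBALL", 3, 10, "down"),
--     ("HOCKEY", 7, 4, "down"),
--     ("GOLF", 10, 1, "down"),
-- ]
--
--
-- def _cells(word, start_row, start_col, direction):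
--     n = len(word)
--     if direction == "down":
--         return [(start_row + i, start_col) for i in range(n)]
--     return [(start_row, start_col + i) for i in range(n)]
--
--
-- _table = {}
-- for _entry in answers:
--     for _cell in _cells(*_entry):
--         _table.setdefault(_cell, _entry)
--
--
-- def get_word_at_cell(row, col):
--     return _table.get((row, col))
-- ===== Notes on version B (the rewrite author's own statement) =====
-- stated objective: idiomatic
-- what changed: B precomputes a dict mapping each covered cell (r, c) to its word entry (setdefault keeps the first word in list order at shared cells) and answers each call with a single table.get((row, col)) instead of A's per-call nested scan over every word and cell.
import Mathlib
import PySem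

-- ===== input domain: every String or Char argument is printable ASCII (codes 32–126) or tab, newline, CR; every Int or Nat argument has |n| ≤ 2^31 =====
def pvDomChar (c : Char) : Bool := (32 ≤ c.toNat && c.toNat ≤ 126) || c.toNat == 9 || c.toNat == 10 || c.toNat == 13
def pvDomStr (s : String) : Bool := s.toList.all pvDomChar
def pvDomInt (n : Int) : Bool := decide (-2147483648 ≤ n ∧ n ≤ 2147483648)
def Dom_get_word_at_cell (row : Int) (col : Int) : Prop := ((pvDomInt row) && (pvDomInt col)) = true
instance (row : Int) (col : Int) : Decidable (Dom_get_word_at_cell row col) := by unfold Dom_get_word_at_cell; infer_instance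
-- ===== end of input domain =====

-- B replaces A's per-call scan of every word's cells by a cell→entry table built once
-- from the fixed `answers` list (first word in list order wins via setdefault), so a call
-- is a single dictionary lookup; equivalence of return values is proved on all of Dom.

-- ===== PORT A =====
def pvAnswers : List (String × Int × Int × String) :=
  [("FOOTBALL", 0, 8, "across"),
   ("TENNIS", 5, 5, "across"),
   ("VOLLEYBALL", 8, 3, "across"),
   ("SOCCER", 11, 0, "across"),
   ("BASKETBALL", 0, 12, "down"),
   ("BASEBALL", 3, 10, "down"),
   ("HOCKEY", 7, 4, "down"),
   ("GOLF", 10, 1, "down")]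

-- the for-loops with early `return` become nested findSome? over the same lists
def get_word_at_cell (row : Int) (col : Int) : Option (String × Int × Int × String) :=
  pvAnswers.findSome? (fun e =>
    let (word, start_row, start_col, direction) := e
    (PySem.List.pyRange 0 (PySem.Str.len word) 1).findSome? (fun i =>
      let r := if direction == "down" then start_row + i else start_row
      let c := if direction == "across" then start_col + i else start_col
      if r == row && c == col then some (word, start_row, start_col, direction) else none))

-- ===== PORT B =====
-- `_cells`: the list of cells a word covers
def pvCells (e : String × Int × Int × String) : List (Int × Int) :=
  let (word, start_row, start_col, direction) := e
  if direction == "down" then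
    (PySem.List.pyRange 0 (PySem.Str.len word) 1).map (fun i => (start_row + i, start_col))
  else
    (PySem.List.pyRange 0 (PySem.Str.len word) 1).map (fun i => (start_row, start_col + i))

-- `_table`: built once; setdefault keeps the first entry covering a shared cell
def pvTable : PySem.Dict (Int × Int) (String × Int × Int × String) :=
  pvAnswers.foldl (fun d e => (pvCells e).foldl (fun d c => d.setdefault c e) d) PySem.Dict.empty

def get_word_at_cell_alt (row : Int) (col : Int) : Option (String × Int × Int × String) :=
  pvTable.get? (row, col)

-- ===== PRECONDITION & SPEC =====
def Spec_get_word_at_cell (row : Int) (col : Int) (out : Option (String × Int × Int × String)) : Prop := out = get_word_at_cell_alt row col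
instance (row : Int) (col : Int) (out : Option (String × Int × Int × String)) : Decidable (Spec_get_word_at_cell row col out) := by unfold Spec_get_word_at_cell; infer_instance

-- ===== CLAIM (what is proved, stated in full; the proofs are below) =====
def Claim_equal_get_word_at_cell : Prop := ∀ (row : Int) (col : Int), Dom_get_word_at_cell row col → Spec_get_word_at_cell row col (get_word_at_cell row col)

-- ===== LEMMAS AND PROOFS =====

-- the fully evaluated table (51 distinct cells)
def pvTableLit : PySem.Dict (Int × Int) (String × Int × Int × String) :=
  PySem.Dict.mk [
((0, 8), ("FOOTBALL", 0, 8, "across")),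
    ((0, 9), ("FOOTBALL", 0, 8, "across")),
    ((0, 10), ("FOOTBALL", 0, 8, "across")),
    ((0, 11), ("FOOTBALL", 0, 8, "across")),
    ((0, 12), ("FOOTBALL", 0, 8, "across")),
    ((0, 13), ("FOOTBALL", 0, 8, "across")),
    ((0, 14), ("FOOTBALL", 0, 8, "across")),
    ((0, 15), ("FOOTBALL", 0, 8, "across")),
    ((5, 5), ("TENNIS", 5, 5, "across")),
    ((5, 6), ("TENNIS", 5, 5, "across")),
    ((5, 7), ("TENNIS", 5, 5, "across")),
    ((5, 8), ("TENNIS", 5, 5, "across")),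
    ((5, 9), ("TENNIS", 5, 5, "across")),
    ((5, 10), ("TENNIS", 5, 5, "across")),
    ((8, 3), ("VOLLEYBALL", 8, 3, "across")),
    ((8, 4), ("VOLLEYBALL", 8, 3, "across")),
    ((8, 5), ("VOLLEYBALL", 8, 3, "across")),
    ((8, 6), ("VOLLEYBALL", 8, 3, "across")),
    ((8, 7), ("VOLLEYBALL", 8, 3, "across")),
    ((8, 8), ("VOLLEYBALL", 8, 3, "across")),
    ((8, 9), ("VOLLEYBALL", 8, 3, "across")),
    ((8, 10), ("VOLLEYBALL", 8, 3, "across")),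
    ((8, 11), ("VOLLEYBALL", 8, 3, "across")),
    ((8, 12), ("VOLLEYBALL", 8, 3, "across")),
    ((11, 0), ("SOCCER", 11, 0, "across")),
    ((11, 1), ("SOCCER", 11, 0, "across")),
    ((11, 2), ("SOCCER", 11, 0, "across")),
    ((11, 3), ("SOCCER", 11, 0, "across")),
    ((11, 4), ("SOCCER", 11, 0, "across")),
    ((11, 5), ("SOCCER", 11, 0, "across")),
    ((1, 12), ("BASKETBALL", 0, 12, "down")),
    ((2, 12), ("BASKETBALL", 0, 12, "down")),
    ((3, 12), ("BASKETBALL", 0, 12, "down")),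
    ((4, 12), ("BASKETBALL", 0, 12, "down")),
    ((5, 12), ("BASKETBALL", 0, 12, "down")),
    ((6, 12), ("BASKETBALL", 0, 12, "down")),
    ((7, 12), ("BASKETBALL", 0, 12, "down")),
    ((9, 12), ("BASKETBALL", 0, 12, "down")),
    ((3, 10), ("BASEBALL", 3, 10, "down")),
    ((4, 10), ("BASEBALL", 3, 10, "down")),
    ((6, 10), ("BASEBALL", 3, 10, "down")),
    ((7, 10), ("BASEBALL", 3, 10, "down")),
    ((9, 10), ("BASEBALL", 3, 10, "down")),
    ((10, 10), ("BASEBALL", 3, 10, "down")),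
    ((7, 4), ("HOCKEY", 7, 4, "down")),
    ((9, 4), ("HOCKEY", 7, 4, "down")),
    ((10, 4), ("HOCKEY", 7, 4, "down")),
    ((12, 4), ("HOCKEY", 7, 4, "down")),
    ((10, 1), ("GOLF", 10, 1, "down")),
    ((12, 1), ("GOLF", 10, 1, "down")),
    ((13, 1), ("GOLF", 10, 1, "down"))  ]

set_option maxRecDepth 40000 in
lemma pvTable_eq_lit : pvTable = pvTableLit := by decide

-- on the 17×17 grid both sides agree (finite kernel check)
set_option maxRecDepth 40000 in
lemma pv_box_all : ((List.range 17).all fun r => (List.range 17).all fun c =>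
    get_word_at_cell (r : Int) (c : Int) == pvTableLit.get? ((r : Int), (c : Int))) = true := by
  decide

lemma pv_box (r c : Nat) (hr : r < 17) (hc : c < 17) :
    get_word_at_cell (r : Int) (c : Int) = pvTableLit.get? ((r : Int), (c : Int)) := by
  have h := pv_box_all
  rw [List.all_eq_true] at h
  have h1 := h r (List.mem_range.mpr hr)
  rw [List.all_eq_true] at h1
  exact beq_iff_eq.mp (h1 c (List.mem_range.mpr hc))

-- outside the grid A's scan never hits
lemma pvA_none (row col : Int) (h : ¬ (0 ≤ row ∧ row < 17 ∧ 0 ≤ col ∧ col < 17)) :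
    get_word_at_cell row col = none := by
  cases hA : get_word_at_cell row col with
  | none => rfl
  | some v =>
    exfalso
    obtain ⟨e, he, hfe⟩ := List.exists_of_findSome?_eq_some hA
    fin_cases he <;>
    · obtain ⟨i, hi, hf⟩ := List.exists_of_findSome?_eq_some hfe
      rw [PySem.List.mem_pyRange_one] at hi
      simp only [show PySem.Str.len "FOOTBALL" = 8 from by decide,
        show PySem.Str.len "TENNIS" = 6 from by decide,
        show PySem.Str.len "VOLLEYBALL" = 10 from by decide,
        show PySem.Str.len "SOCCER" = 6 from by decide,
        show PySem.Str.len "BASKETBALL" = 10 from by decide,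
        show PySem.Str.len "BASEBALL" = 8 from by decide,
        show PySem.Str.len "HOCKEY" = 6 from by decide,
        show PySem.Str.len "GOLF" = 4 from by decide] at hi
      simp at hf
      omega

-- outside the grid no table key matches
lemma pvLit_none (row col : Int) (h : ¬ (0 ≤ row ∧ row < 17 ∧ 0 ≤ col ∧ col < 17)) :
    pvTableLit.get? (row, col) = none := by
  rw [PySem.Dict.get?_eq_none_iff_not_mem_keys]
  intro hmem
  simp only [pvTableLit, PySem.Dict.keys_mk, List.map_cons, List.map_nil, List.mem_cons,
    List.not_mem_nil, or_false, Prod.mk.injEq] at hmem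
  omega

-- ===== VERDICT (by name: the statement is the Claim_ definition above) =====
theorem get_word_at_cell_spec : Claim_equal_get_word_at_cell := by
  intro row col _
  unfold Spec_get_word_at_cell get_word_at_cell_alt
  rw [pvTable_eq_lit]
  by_cases hb : 0 ≤ row ∧ row < 17 ∧ 0 ≤ col ∧ col < 17
  · obtain ⟨h1, h2, h3, h4⟩ := hb
    have hr : row = ((row.toNat : Nat) : Int) := by omega
    have hc : col = ((col.toNat : Nat) : Int) := by omega
    rw [hr, hc]
    exact pv_box row.toNat col.toNat (by omega) (by omega)
  · rw [pvA_none row col hb, pvLit_none row col hb]
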